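-- pv_equiv track=rewrite | github.com/photboll/leetcode | 3315.construct-the-minimum-bitwise-array-ii.py | minBitwiseArray
-- ===== SOURCE A (Python) =====
-- from typing import List
--
-- def minBitwiseArray(nums: List[int]) -> List[int]:
--     for i in range(len(nums)):
--         res = -1
--         d = 1
--         while (nums[i] & d) != 0:
--             res = nums[i] -d
--             d <<= 1
--         nums[i] = res
--
--     return nums
-- ===== SOURCE B (Python) =====
-- from typing import List
--
-- def minBitwiseArray(nums: List[int]) -> List[int]:
--     # In-place like A: overwrite nums[i] and return the same list object.
--     for i, n in enumerate(nums):
--         if n % 2 == 0: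
--             nums[i] = -1
--         else:
--             lowbit = (n + 1) & -(n + 1)  # 2**k, k = number of trailing 1-bits of n
--             nums[i] = n - lowbit // 2
--     return nums
-- ===== Notes on version B (the rewrite author's own statement) =====
-- stated objective: simpler
-- what changed: The inner while-loop that scans set bits with a doubling mask is replaced by a closed-form bit trick: for odd n the answer is n - ((n+1) & -(n+1))//2, for even n it is -1; no inner loop remains.
import Mathlib
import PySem

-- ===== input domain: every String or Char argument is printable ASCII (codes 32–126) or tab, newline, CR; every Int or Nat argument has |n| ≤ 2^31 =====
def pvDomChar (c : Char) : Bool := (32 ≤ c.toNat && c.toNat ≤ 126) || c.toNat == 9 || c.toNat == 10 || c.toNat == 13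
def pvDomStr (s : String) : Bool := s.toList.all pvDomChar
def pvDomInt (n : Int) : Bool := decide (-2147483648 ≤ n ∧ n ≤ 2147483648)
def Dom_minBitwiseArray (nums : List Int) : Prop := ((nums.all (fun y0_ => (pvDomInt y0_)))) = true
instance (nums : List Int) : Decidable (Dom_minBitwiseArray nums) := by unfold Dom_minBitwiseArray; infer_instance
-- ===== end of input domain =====

-- B replaces A's inner mask-doubling while-loop by a closed-form bit trick per element
-- (objective: simpler).  In Python both A and B overwrite nums[i] in place and return the
-- same list object; the equivalence proved here is about the returned value.

-- ===== PORT A =====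
-- A's inner 'while (nums[i] & d) != 0' loop, transliterated with a fuel counter; on the
-- inputs admitted by Dom_ and Pre_ the loop runs at most 33 times, so fuel 64 is never
-- exhausted (that is what the proofs below establish).
def pvLoopA (n : Int) : Nat → Int → Int → Int
  | 0, res, _ => res
  | fuel+1, res, d =>
      if PySem.Int.band n d ≠ 0 then pvLoopA n fuel (n - d) (d <<< (1 : Nat)) else res

def minBitwiseArray (nums : List Int) : List Int :=
  nums.map (fun n => pvLoopA n 64 (-1) 1)

-- ===== PORT B =====
def pvAltElem (n : Int) : Int :=
  if PySem.Int.mod n 2 = 0 then -1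
  else n - PySem.Int.floordiv (PySem.Int.band (n + 1) (-(n + 1))) 2

def minBitwiseArray_alt (nums : List Int) : List Int :=
  nums.map pvAltElem

-- ===== PRECONDITION & SPEC =====
-- Pre_ excludes lists containing -1: there A's inner while-loop never terminates
-- (every bit of -1 is set), so A returns normally on exactly the inputs admitted here.
def Pre_minBitwiseArray (nums : List Int) : Prop := (nums.all (fun x => x != -1)) = true
instance (nums : List Int) : Decidable (Pre_minBitwiseArray nums) := by
  unfold Pre_minBitwiseArray; infer_instance

def pvWitness_minBitwiseArray : List Int := [5, 2, 0, -4, 7, 1073741823]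

def Spec_minBitwiseArray (nums : List Int) (out : List Int) : Prop := out = minBitwiseArray_alt nums
instance (nums : List Int) (out : List Int) : Decidable (Spec_minBitwiseArray nums out) := by unfold Spec_minBitwiseArray; infer_instance

-- ===== CLAIM (what is proved, stated in full; the proofs are below) =====
def Claim_equal_minBitwiseArray : Prop := ∀ (nums : List Int), Dom_minBitwiseArray nums → Pre_minBitwiseArray nums → Spec_minBitwiseArray nums (minBitwiseArray nums)

-- ===== LEMMAS AND PROOFS =====

lemma pvLoopA_succ (n : Int) (f : Nat) (res d : Int) :
    pvLoopA n (f+1) res d =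
      if PySem.Int.band n d ≠ 0 then pvLoopA n f (n - d) (d <<< (1 : Nat)) else res := rfl

-- bit-level halving identities for Nat's &&& / ||| (low bits written as min / max so that
-- omega can consume them)
lemma pvNatAnd_bits (a b e f : Nat) (he : e < 2) (hf : f < 2) :
    (2*a+e) &&& (2*b+f) = 2*(a &&& b) + min e f := by
  apply Nat.eq_of_testBit_eq
  intro i
  cases i with
  | zero =>
      simp only [Nat.testBit_zero]
      rcases (by omega : e = 0 ∨ e = 1) with rfl | rfl <;>
        rcases (by omega : f = 0 ∨ f = 1) with rfl | rfl <;>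
          simp [Nat.mul_mod_right]
  | succ i =>
      have h1 : (2*a+e)/2 = a := by omega
      have h2 : (2*b+f)/2 = b := by omega
      have h3 : (2*(a &&& b) + min e f)/2 = a &&& b := by omega
      rw [Nat.testBit_and, Nat.testBit_add_one, Nat.testBit_add_one, Nat.testBit_add_one,
        h1, h2, h3, Nat.testBit_and]

lemma pvNatOr_bits (a b e f : Nat) (he : e < 2) (hf : f < 2) :
    (2*a+e) ||| (2*b+f) = 2*(a ||| b) + max e f := by
  apply Nat.eq_of_testBit_eq
  intro i
  cases i with
  | zero =>
      simp only [Nat.testBit_zero]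
      rcases (by omega : e = 0 ∨ e = 1) with rfl | rfl <;>
        rcases (by omega : f = 0 ∨ f = 1) with rfl | rfl <;>
          simp [Nat.mul_mod_right]
  | succ i =>
      have h1 : (2*a+e)/2 = a := by omega
      have h2 : (2*b+f)/2 = b := by omega
      have h3 : (2*(a ||| b) + max e f)/2 = a ||| b := by omega
      rw [Nat.testBit_or, Nat.testBit_add_one, Nat.testBit_add_one, Nat.testBit_add_one,
        h1, h2, h3, Nat.testBit_or]

-- halving identity for PySem's Python-exact band, all sign combinations
lemma pvBand_bits (a b e f : Int) (he0 : 0 ≤ e) (he : e < 2) (hf0 : 0 ≤ f) (hf : f < 2) :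
    PySem.Int.band (2*a+e) (2*b+f) = 2 * PySem.Int.band a b + min e f := by
  unfold PySem.Int.band
  by_cases ha : 0 ≤ a <;> by_cases hb : 0 ≤ b
  · rw [if_pos (show (0:Int) ≤ 2*a+e by omega), if_pos (show (0:Int) ≤ 2*b+f by omega),
      if_pos ha, if_pos hb,
      show (2*a+e).toNat = 2*a.toNat + e.toNat by omega,
      show (2*b+f).toNat = 2*b.toNat + f.toNat by omega,
      pvNatAnd_bits _ _ _ _ (by omega) (by omega)]
    omega
  · rw [if_pos (show (0:Int) ≤ 2*a+e by omega), if_neg (show ¬ (0:Int) ≤ 2*b+f by omega),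
      if_pos ha, if_neg hb,
      show (2*a+e).toNat = 2*a.toNat + e.toNat by omega,
      show (-(2*b+f) - 1).toNat = 2*(-b-1).toNat + (1-f).toNat by omega,
      pvNatAnd_bits _ _ _ _ (by omega) (by omega)]
    have h1 : a.toNat &&& (-b-1).toNat ≤ a.toNat := Nat.and_le_left
    omega
  · rw [if_neg (show ¬ (0:Int) ≤ 2*a+e by omega), if_pos (show (0:Int) ≤ 2*b+f by omega),
      if_neg ha, if_pos hb,
      show (2*b+f).toNat = 2*b.toNat + f.toNat by omega,
      show (-(2*a+e) - 1).toNat = 2*(-a-1).toNat + (1-e).toNat by omega,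
      pvNatAnd_bits _ _ _ _ (by omega) (by omega)]
    have h1 : b.toNat &&& (-a-1).toNat ≤ b.toNat := Nat.and_le_left
    omega
  · rw [if_neg (show ¬ (0:Int) ≤ 2*a+e by omega), if_neg (show ¬ (0:Int) ≤ 2*b+f by omega),
      if_neg ha, if_neg hb,
      show (-(2*a+e) - 1).toNat = 2*(-a-1).toNat + (1-e).toNat by omega,
      show (-(2*b+f) - 1).toNat = 2*(-b-1).toNat + (1-f).toNat by omega,
      pvNatOr_bits _ _ _ _ (by omega) (by omega)]
    omega

lemma pvBand_even_even (a b : Int) :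
    PySem.Int.band (2*a) (2*b) = 2 * PySem.Int.band a b := by
  have h := pvBand_bits a b 0 0 (by norm_num) (by norm_num) (by norm_num) (by norm_num)
  simp only [add_zero] at h
  omega

lemma pvBand_odd_even (a b : Int) :
    PySem.Int.band (2*a+1) (2*b) = 2 * PySem.Int.band a b := by
  have h := pvBand_bits a b 1 0 (by norm_num) (by norm_num) (by norm_num) (by norm_num)
  simp only [add_zero] at h
  omega

lemma pvBand_even_odd (a b : Int) :
    PySem.Int.band (2*a) (2*b+1) = 2 * PySem.Int.band a b := by
  have h := pvBand_bits a b 0 1 (by norm_num) (by norm_num) (by norm_num) (by norm_num)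
  simp only [add_zero] at h
  omega

lemma pvBand_odd_odd (a b : Int) :
    PySem.Int.band (2*a+1) (2*b+1) = 2 * PySem.Int.band a b + 1 := by
  have h := pvBand_bits a b 1 1 (by norm_num) (by norm_num) (by norm_num) (by norm_num)
  omega

-- a & ~a = 0 (bounded form for the induction, then the clean corollary)
lemma pvBand_lnot_self_aux : ∀ (k : Nat) (a : Int), a.natAbs ≤ k →
    PySem.Int.band a (-a - 1) = 0 := by
  intro k
  induction k with
  | zero =>
      intro a h
      have h0 : a = 0 := by omega
      subst h0; decide
  | succ k IH =>
      intro a h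
      by_cases h0 : a = 0
      · subst h0; decide
      by_cases h1 : a = -1
      · subst h1; decide
      rcases Int.even_or_odd a with ⟨q, hq⟩ | ⟨q, hq⟩
      · have hq2 : a = 2*q := by omega
        rw [hq2, show -(2*q) - 1 = 2*(-q-1)+1 by ring, pvBand_even_odd]
        have hrec := IH q (by omega)
        omega
      · have hq2 : a = 2*q+1 := by omega
        rw [hq2, show -(2*q+1) - 1 = 2*(-q-1) by ring, pvBand_odd_even]
        have hrec := IH q (by omega)
        omega

lemma pvBand_lnot_self (a : Int) : PySem.Int.band a (-a - 1) = 0 :=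
  pvBand_lnot_self_aux a.natAbs a (le_refl _)

-- odd u → u & -u = 1
lemma pvBand_neg_self_odd (u : Int) (hu : u % 2 = 1) :
    PySem.Int.band u (-u) = 1 := by
  obtain ⟨c, rfl⟩ : ∃ c, u = 2*c+1 := ⟨(u-1)/2, by omega⟩
  rw [show -(2*c+1) = 2*(-c-1)+1 by ring, pvBand_odd_odd]
  have h := pvBand_lnot_self c
  omega

-- B's element formula on odd arguments, structurally
lemma pvFloordiv_two_mul (x : Int) : PySem.Int.floordiv (2*x) 2 = x := by
  rw [PySem.Int.floordiv_eq_ediv_of_pos (by norm_num)]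
  exact Int.mul_ediv_cancel_left x (by norm_num)

lemma pvAltElem_odd_even (m : Int) (hm : m % 2 = 0) :
    pvAltElem (2*m+1) = 2*m := by
  unfold pvAltElem
  rw [if_neg (show ¬ PySem.Int.mod (2*m+1) 2 = 0 by
        rw [PySem.Int.mod_eq_emod_of_pos (by norm_num)]; omega),
    show (2*m+1+1 : Int) = 2*(m+1) by ring,
    show (-(2*(m+1)) : Int) = 2*(-(m+1)) by ring,
    pvBand_even_even,
    pvBand_neg_self_odd (m+1) (by omega),
    pvFloordiv_two_mul]
  ring

lemma pvAltElem_odd_odd (m : Int) (hm : m % 2 = 1) :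
    pvAltElem (2*m+1) = 2 * pvAltElem m + 1 := by
  obtain ⟨t, rfl⟩ : ∃ t, m = 2*t+1 := ⟨(m-1)/2, by omega⟩
  unfold pvAltElem
  rw [if_neg (show ¬ PySem.Int.mod (2*(2*t+1)+1) 2 = 0 by
        rw [PySem.Int.mod_eq_emod_of_pos (by norm_num)]; omega),
    if_neg (show ¬ PySem.Int.mod (2*t+1) 2 = 0 by
        rw [PySem.Int.mod_eq_emod_of_pos (by norm_num)]; omega),
    show (2*(2*t+1)+1+1 : Int) = 2*(2*(t+1)) by ring,
    show (2*t+1+1 : Int) = 2*(t+1) by ring,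
    show (-(2*(2*(t+1))) : Int) = 2*(2*(-(t+1))) by ring,
    show (-(2*(t+1)) : Int) = 2*(-(t+1)) by ring,
    pvBand_even_even, pvBand_even_even,
    show (2*(2 * PySem.Int.band (t+1) (-(t+1))) : Int)
        = 2*(2 * PySem.Int.band (t+1) (-(t+1))) from rfl,
    pvFloordiv_two_mul, pvFloordiv_two_mul]
  ring

-- the inner-loop shift lemma: odd running result, even mask
lemma pvLoopA_shift (f : Nat) : ∀ (m d r : Int),
    pvLoopA (2*m+1) f (2*r+1) (2*d) = 2 * pvLoopA m f r d + 1 := by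
  induction f with
  | zero => intro m d r; rfl
  | succ f IH =>
      intro m d r
      rw [pvLoopA_succ, pvLoopA_succ, pvBand_odd_even m d]
      by_cases hc : PySem.Int.band m d = 0
      · simp [hc]
      · rw [if_pos (show (2:Int) * PySem.Int.band m d ≠ 0 by omega), if_pos hc,
          show (2*m+1) - 2*d = 2*(m-d)+1 by ring,
          show ((2*d) <<< (1:Nat) : Int) = 2*(d <<< (1:Nat)) by
            rw [Int.shiftLeft_eq, Int.shiftLeft_eq]; ring]
        exact IH m (d <<< (1:Nat)) (m - d)

lemma pvLoopA_shift₂ (f : Nat) (m r r' : Int) (hm : m % 2 = 1) :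
    pvLoopA (2*m+1) (f+1) r 2 = 2 * pvLoopA m (f+1) r' 1 + 1 := by
  have hb1 : PySem.Int.band (2*m+1) 2 = 2 * PySem.Int.mod m 2 := by
    have h := pvBand_odd_even m 1
    rw [PySem.Int.band_one] at h
    simpa using h
  have hmod : PySem.Int.mod m 2 = 1 := by
    rw [PySem.Int.mod_eq_emod_of_pos (by norm_num)]; exact hm
  rw [pvLoopA_succ, pvLoopA_succ,
    if_pos (show PySem.Int.band (2*m+1) 2 ≠ 0 by rw [hb1, hmod]; norm_num),
    if_pos (show PySem.Int.band m 1 ≠ 0 by rw [PySem.Int.band_one, hmod]; norm_num),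
    show (2*m+1) - 2 = 2*(m-1)+1 by ring,
    show ((2:Int) <<< (1:Nat)) = 2*2 from by decide,
    show ((1:Int) <<< (1:Nat)) = 2 from by decide]
  exact pvLoopA_shift f m 2 (m-1)

-- per-element equivalence for odd n, by induction on the bit length of n+1
lemma pvLoop_odd_eq : ∀ (f : Nat) (n : Int), n % 2 = 1 → n ≠ -1 →
    (n+1).natAbs ≤ 2^(f+1) → pvLoopA n (f+2) (-1) 1 = pvAltElem n := by
  intro f
  induction f with
  | zero =>
      intro n hm hne hb
      have h2 : (2:Nat)^(0+1) = 2 := by norm_num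
      have : n = 1 ∨ n = -3 := by omega
      rcases this with rfl | rfl <;> decide
  | succ f IH =>
      intro n hm hne hb
      obtain ⟨m, rfl⟩ : ∃ m, n = 2*m+1 := ⟨(n-1)/2, by omega⟩
      have hcond1 : PySem.Int.band (2*m+1) 1 ≠ 0 := by
        rw [PySem.Int.band_one, PySem.Int.mod_eq_emod_of_pos (by norm_num)]; omega
      show pvLoopA (2*m+1) ((f+2)+1) (-1) 1 = pvAltElem (2*m+1)
      rw [pvLoopA_succ, if_pos hcond1,
        show (2*m+1) - 1 = 2*m by ring,
        show ((1:Int) <<< (1:Nat)) = 2 from by decide]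
      by_cases hm2 : m % 2 = 1
      · -- m odd: shift the whole loop down one bit and use the induction hypothesis
        have hmne : m ≠ -1 := by
          intro hmm; apply hne; rw [hmm]; norm_num
        have hbound : (m+1).natAbs ≤ 2^(f+1) := by
          have hp : (2:Nat)^(f+1+1) = 2^(f+1) * 2 := by rw [pow_succ]
          omega
        rw [show pvLoopA (2*m+1) (f+2) (2*m) 2
              = 2 * pvLoopA m (f+1+1) (-1) 1 + 1 from pvLoopA_shift₂ (f+1) m (2*m) (-1) hm2,
          show pvLoopA m (f+1+1) (-1) 1 = pvAltElem m from
            IH m hm2 hmne hbound,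
          pvAltElem_odd_odd m hm2]
      · -- m even: the loop stops at d = 2 with result 2*m = n - 1
        have hm0 : m % 2 = 0 := by omega
        have hc0 : PySem.Int.band (2*m+1) 2 = 0 := by
          have h := pvBand_odd_even m 1
          rw [PySem.Int.band_one] at h
          have hz : PySem.Int.mod m 2 = 0 := by
            rw [PySem.Int.mod_eq_emod_of_pos (by norm_num)]; omega
          rw [hz] at h
          simpa using h
        show pvLoopA (2*m+1) ((f+1)+1) (2*m) 2 = pvAltElem (2*m+1)
        rw [pvLoopA_succ, if_neg (by simp [hc0]), pvAltElem_odd_even m hm0]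

lemma pvElem_eq (n : Int) (hdom : -2147483648 ≤ n ∧ n ≤ 2147483648) (hne : n ≠ -1) :
    pvLoopA n 64 (-1) 1 = pvAltElem n := by
  by_cases hm : n % 2 = 1
  · have hp : (2:Nat)^(62+1) = 9223372036854775808 := by norm_num
    exact pvLoop_odd_eq 62 n hm hne (by omega)
  · have h0 : PySem.Int.band n 1 = 0 := by
      rw [PySem.Int.band_one, PySem.Int.mod_eq_emod_of_pos (by norm_num)]; omega
    show pvLoopA n (63+1) (-1) 1 = pvAltElem n
    rw [pvLoopA_succ, if_neg (by simp [h0])]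
    unfold pvAltElem
    rw [if_pos (show PySem.Int.mod n 2 = 0 by
      rw [PySem.Int.mod_eq_emod_of_pos (by norm_num)]; omega)]

-- ===== VERDICT (by name: the statement is the Claim_ definition above) =====
theorem minBitwiseArray_spec : Claim_equal_minBitwiseArray := by
  intro nums hdom hpre
  unfold Spec_minBitwiseArray minBitwiseArray minBitwiseArray_alt
  apply List.map_congr_left
  intro n hn
  have hd : pvDomInt n = true := by
    have := (List.all_eq_true.mp hdom) n hn
    simpa using this
  have hb : -2147483648 ≤ n ∧ n ≤ 2147483648 := by
    simpa [pvDomInt] using hd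
  have hne : n ≠ -1 := by
    have := (List.all_eq_true.mp hpre) n hn
    simpa using this
  exact pvElem_eq n hb hne
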